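-- pv_equiv track=rewrite | github.com/yemao616/summer18 | Google/2. medium/361. Bomb Enemy.py | maxKilledEnemies
-- ===== SOURCE A (Python) =====
-- def maxKilledEnemies(grid):		# O(mn)
--     """
--     :type grid: List[List[str]]
--     :rtype: int
--     """
--     if not grid:
--         return 0
--     max_hits = 0
--     nums = [[0 for i in range(len(grid[0]))] for j in range(len(grid))]
--
--     #From Left
--     for i in range(len(grid)):
--         row_hits = 0
--         for j in range(len(grid[0])):
--             if grid[i][j] == 'E':
--                 row_hits += 1
--             elif grid[i][j] == 'W':
--                 row_hits = 0
--             else: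
--                 nums[i][j] = row_hits
--
--         row_hits = 0
--         for j in range(len(grid[0])-1, -1, -1):
--             if grid[i][j] == 'W':
--                 row_hits = 0
--             elif grid[i][j] == 'E':
--                 row_hits +=1
--             else:
--                 nums[i][j] += row_hits
--
--     for i in range(len(nums[0])):
--         col_hits = 0
--         for col in range(len(nums)):
--             if grid[col][i] == 'E':
--                 col_hits += 1
--             elif grid[col][i] == 'W':
--                 col_hits = 0
--             else:
--                 nums[col][i] += col_hits
--
--         col_hits = 0
--         for col in range(len(nums)-1, -1, -1):
--             if grid[col][i] == 'E':
--                 col_hits +=1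
--             elif grid[col][i] == 'W':
--                 col_hits = 0
--             else:
--                 nums[col][i] += col_hits
--                 max_hits = max(max_hits, nums[col][i])
--
--
--     return max_hits
-- ===== SOURCE B (Python) =====
-- def _seg(cells):
--     k = 0
--     for c in cells:
--         if c == 'W':
--             break
--         if c == 'E':
--             k += 1
--     return k
--
-- def maxKilledEnemies(grid):
--     n = len(grid[0]) if grid else 0
--     best = 0
--     for i in range(len(grid)):
--         for j in range(n):
--             c = grid[i][j]
--             if c == 'E' or c == 'W':
--                 continue
--             row = [grid[i][t] for t in range(n)]
--             col = [grid[t][j] for t in range(len(grid))]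
--             hits = (_seg(row[:j][::-1]) + _seg(row[j+1:])
--                     + _seg(col[:i][::-1]) + _seg(col[i+1:]))
--             best = max(best, hits)
--     return best
-- ===== Notes on version B (the rewrite author's own statement) =====
-- stated objective: simpler
-- what changed: Replaces A's four-pass dynamic-programming accumulation into an m*n auxiliary matrix by a direct per-cell brute force: for each placeable cell count the E's along its wall-free row and column segments with one small helper; no auxiliary matrix, no passes.
import Mathlib
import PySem

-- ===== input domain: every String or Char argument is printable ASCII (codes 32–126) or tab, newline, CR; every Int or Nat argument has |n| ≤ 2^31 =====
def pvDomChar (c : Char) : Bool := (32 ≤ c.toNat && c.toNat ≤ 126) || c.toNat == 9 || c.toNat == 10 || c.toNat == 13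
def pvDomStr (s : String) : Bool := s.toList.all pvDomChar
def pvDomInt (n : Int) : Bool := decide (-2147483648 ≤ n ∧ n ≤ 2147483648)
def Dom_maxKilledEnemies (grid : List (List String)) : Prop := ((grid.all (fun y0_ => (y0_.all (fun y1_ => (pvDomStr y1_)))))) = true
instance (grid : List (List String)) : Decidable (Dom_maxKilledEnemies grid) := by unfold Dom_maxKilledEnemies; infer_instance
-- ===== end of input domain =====

-- B replaces A's four DP passes over an auxiliary matrix by a direct per-cell segment count: simpler (shorter, no matrix), not faster.


-- ===== PORT A =====
-- helpers mirroring Python's nums[i][j] read / write (exact for the in-range indices A uses)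
def pvGet2 (A : List (List Int)) (i j : Nat) : Int := (A.getD i []).getD j 0
def pvSet2 (A : List (List Int)) (i j : Nat) (v : Int) : List (List Int) :=
  A.set i ((A.getD i []).set j v)

-- literal port of A; range(k-1,-1,-1) is ported as (List.range k).reverse (the same index list)
def maxKilledEnemies (grid : List (List String)) : Int :=
  if grid = [] then 0
  else
    let m := grid.length
    let n := (grid.headD []).length
    let nums0 : List (List Int) := (List.range m).map (fun _ => (List.range n).map (fun _ => (0 : Int)))
    let numsR := (List.range m).foldl (fun nums i =>
        let s1 := (List.range n).foldl (fun (p : Int × List (List Int)) j =>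
            let c := (grid.getD i []).getD j ""
            if c = "E" then (p.1 + 1, p.2)
            else if c = "W" then ((0 : Int), p.2)
            else (p.1, pvSet2 p.2 i j p.1)) ((0 : Int), nums)
        let s2 := ((List.range n).reverse).foldl (fun (p : Int × List (List Int)) j =>
            let c := (grid.getD i []).getD j ""
            if c = "W" then ((0 : Int), p.2)
            else if c = "E" then (p.1 + 1, p.2)
            else (p.1, pvSet2 p.2 i j (pvGet2 p.2 i j + p.1))) ((0 : Int), s1.2)
        s2.2) nums0
    let fin := (List.range ((numsR.headD []).length)).foldl (fun (q : Int × List (List Int)) i =>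
        let s1 := (List.range q.2.length).foldl (fun (p : Int × List (List Int)) col =>
            let c := (grid.getD col []).getD i ""
            if c = "E" then (p.1 + 1, p.2)
            else if c = "W" then ((0 : Int), p.2)
            else (p.1, pvSet2 p.2 col i (pvGet2 p.2 col i + p.1))) ((0 : Int), q.2)
        let s2 := ((List.range s1.2.length).reverse).foldl (fun (p : Int × Int × List (List Int)) col =>
            let c := (grid.getD col []).getD i ""
            if c = "E" then (p.1 + 1, p.2.1, p.2.2)
            else if c = "W" then ((0 : Int), p.2.1, p.2.2)
            else
              let v := pvGet2 p.2.2 col i + p.1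
              (p.1, max p.2.1 v, pvSet2 p.2.2 col i v)) ((0 : Int), q.1, s1.2)
        (s2.2.1, s2.2.2)) ((0 : Int), numsR)
    fin.1

-- ===== PORT B =====
-- port of Source B's _seg: count 'E' until the first 'W'
def pvSeg : List String → Int
  | [] => 0
  | c :: r => if c = "W" then 0 else (if c = "E" then (1 : Int) else 0) + pvSeg r

-- literal port of Source B; slices row[:j][::-1] / row[j+1:] are (take j).reverse / drop (j+1), exact here (0 ≤ j)
def maxKilledEnemies_alt (grid : List (List String)) : Int :=
  let n := (grid.headD []).length
  (List.range grid.length).foldl (fun best i =>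
    (List.range n).foldl (fun best j =>
      let c := (grid.getD i []).getD j ""
      if c = "E" ∨ c = "W" then best
      else
        let row := (List.range n).map (fun t => (grid.getD i []).getD t "")
        let col := (List.range grid.length).map (fun t => (grid.getD t []).getD j "")
        let hits := pvSeg ((row.take j).reverse) + pvSeg (row.drop (j + 1))
                  + pvSeg ((col.take i).reverse) + pvSeg (col.drop (i + 1))
        max best hits) best) 0

-- ===== PRECONDITION & SPEC =====
-- Pre_ excludes exactly the ragged grids on which A raises IndexError: some row shorter than row 0.
def Pre_maxKilledEnemies (grid : List (List String)) : Prop :=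
  ∀ r ∈ grid, (grid.headD []).length ≤ r.length
instance (grid : List (List String)) : Decidable (Pre_maxKilledEnemies grid) := by
  unfold Pre_maxKilledEnemies; infer_instance

def pvWitness_maxKilledEnemies : List (List String) :=
  [["0", "E", "0"], ["E", "W", "E"], ["0", "E", "0"]]

def Spec_maxKilledEnemies (grid : List (List String)) (out : Int) : Prop := out = maxKilledEnemies_alt grid
instance (grid : List (List String)) (out : Int) : Decidable (Spec_maxKilledEnemies grid out) := by unfold Spec_maxKilledEnemies; infer_instance

-- ===== CLAIM (what is proved, stated in full; the proofs are below) =====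
def Claim_equal_maxKilledEnemies : Prop := ∀ (grid : List (List String)), Dom_maxKilledEnemies grid → Pre_maxKilledEnemies grid → Spec_maxKilledEnemies grid (maxKilledEnemies grid)

-- ===== LEMMAS AND PROOFS =====

-- ---------- proof-layer definitions ----------
def pvCell (g : List (List String)) (i j : Nat) : String := (g.getD i []).getD j ""
def pvPlc (g : List (List String)) (i j : Nat) : Bool :=
  !(pvCell g i j == "E" || pvCell g i j == "W")
def pvRowL (g : List (List String)) (i : Nat) : List String :=
  (List.range (g.headD []).length).map (fun t => pvCell g i t)
def pvColL (g : List (List String)) (j : Nat) : List String :=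
  (List.range g.length).map (fun t => pvCell g t j)
def pvLR (g : List (List String)) (i j : Nat) : Int :=
  pvSeg (((pvRowL g i).take j).reverse) + pvSeg ((pvRowL g i).drop (j + 1))
def pvK (g : List (List String)) (i j : Nat) : Int :=
  pvLR g i j + pvSeg (((pvColL g j).take i).reverse) + pvSeg ((pvColL g j).drop (i + 1))
def pvShape (A : List (List Int)) (m n : Nat) : Prop :=
  A.length = m ∧ ∀ r ∈ A, r.length = n
def pvNums0 (g : List (List String)) : List (List Int) :=
  (List.range g.length).map (fun _ => (List.range (g.headD []).length).map (fun _ => (0 : Int)))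
def pvStepL (g : List (List String)) (i : Nat) : (Int × List (List Int)) → Nat → (Int × List (List Int)) :=
  fun p j =>
    if (g.getD i []).getD j "" = "E" then (p.1 + 1, p.2)
    else if (g.getD i []).getD j "" = "W" then ((0 : Int), p.2)
    else (p.1, pvSet2 p.2 i j p.1)
def pvStepR (g : List (List String)) (i : Nat) : (Int × List (List Int)) → Nat → (Int × List (List Int)) :=
  fun p j =>
    if (g.getD i []).getD j "" = "W" then ((0 : Int), p.2)
    else if (g.getD i []).getD j "" = "E" then (p.1 + 1, p.2)
    else (p.1, pvSet2 p.2 i j (pvGet2 p.2 i j + p.1))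
def pvStepD (g : List (List String)) (i : Nat) : (Int × List (List Int)) → Nat → (Int × List (List Int)) :=
  fun p col =>
    if (g.getD col []).getD i "" = "E" then (p.1 + 1, p.2)
    else if (g.getD col []).getD i "" = "W" then ((0 : Int), p.2)
    else (p.1, pvSet2 p.2 col i (pvGet2 p.2 col i + p.1))
def pvStepU (g : List (List String)) (i : Nat) : (Int × Int × List (List Int)) → Nat → (Int × Int × List (List Int)) :=
  fun p col =>
    if (g.getD col []).getD i "" = "E" then (p.1 + 1, p.2.1, p.2.2)
    else if (g.getD col []).getD i "" = "W" then ((0 : Int), p.2.1, p.2.2)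
    else (p.1, max p.2.1 (pvGet2 p.2.2 col i + p.1),
      pvSet2 p.2.2 col i (pvGet2 p.2.2 col i + p.1))
def pvRowBody (g : List (List String)) : List (List Int) → Nat → List (List Int) :=
  fun nums i =>
    let s1 := (List.range (g.headD []).length).foldl (pvStepL g i) ((0 : Int), nums)
    let s2 := ((List.range (g.headD []).length).reverse).foldl (pvStepR g i) ((0 : Int), s1.2)
    s2.2
def pvColBody (g : List (List String)) : (Int × List (List Int)) → Nat → (Int × List (List Int)) :=
  fun q i =>
    let s1 := (List.range q.2.length).foldl (pvStepD g i) ((0 : Int), q.2)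
    let s2 := ((List.range s1.2.length).reverse).foldl (pvStepU g i) ((0 : Int), q.1, s1.2)
    (s2.2.1, s2.2.2)

-- ---------- small utilities ----------
lemma pvSeg_cons (c : String) (l : List String) :
    pvSeg (c :: l) = if c = "W" then 0 else (if c = "E" then (1 : Int) else 0) + pvSeg l := rfl

lemma pvTake_succ_getD {a : Type} (l : List a) (d : a) {k : Nat} (h : k < l.length) :
    l.take (k + 1) = l.take k ++ [l.getD k d] := by
  rw [List.take_add_one]
  simp [List.getElem?_eq_getElem h]

lemma pvDrop_getD_cons {a : Type} (l : List a) (d : a) {k : Nat} (h : k < l.length) :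
    l.drop k = l.getD k d :: l.drop (k + 1) := by
  rw [List.drop_eq_getElem_cons h, List.getD_eq_getElem _ _ h]

lemma pvRowL_length (g : List (List String)) (i : Nat) :
    (pvRowL g i).length = (g.headD []).length := by simp [pvRowL]

lemma pvColL_length (g : List (List String)) (j : Nat) :
    (pvColL g j).length = g.length := by simp [pvColL]

lemma pvRowL_getD (g : List (List String)) (i : Nat) {j : Nat} (h : j < (g.headD []).length) :
    (pvRowL g i).getD j "" = pvCell g i j := by
  have h' : j < (pvRowL g i).length := by simpa [pvRowL_length] using h
  rw [List.getD_eq_getElem _ _ h']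
  simp [pvRowL]

lemma pvColL_getD (g : List (List String)) (j : Nat) {i : Nat} (h : i < g.length) :
    (pvColL g j).getD i "" = pvCell g i j := by
  have h' : i < (pvColL g j).length := by simpa [pvColL_length] using h
  rw [List.getD_eq_getElem _ _ h']
  simp [pvColL]

lemma pvGetD_set_ne {a : Type} (A : List a) (d : a) (i c : Nat) (r : a) (h : i ≠ c) :
    (A.set i r).getD c d = A.getD c d := by
  simp only [List.getD_eq_getElem?_getD, List.getElem?_set, if_neg h]

lemma pvGetD_set_self {a : Type} (A : List a) (d : a) (i : Nat) (r : a) (h : i < A.length) :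
    (A.set i r).getD i d = r := by
  simp [List.getD_eq_getElem?_getD, h]

lemma pvShape_set2 {A : List (List Int)} {m n : Nat} (h : pvShape A m n)
    {i : Nat} (hi : i < m) (j : Nat) (v : Int) : pvShape (pvSet2 A i j v) m n := by
  obtain ⟨h1, h2⟩ := h
  refine ⟨by simpa [pvSet2] using h1, ?_⟩
  intro r hr
  rcases List.mem_or_eq_of_mem_set hr with h' | h'
  · exact h2 r h'
  · subst h'
    have hiA : i < A.length := h1 ▸ hi
    rw [List.length_set, List.getD_eq_getElem _ _ hiA]
    exact h2 _ (List.getElem_mem hiA)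

lemma pvGet2_set2_self {A : List (List Int)} {m n : Nat} (h : pvShape A m n)
    {i j : Nat} (hi : i < m) (hj : j < n) (v : Int) :
    pvGet2 (pvSet2 A i j v) i j = v := by
  obtain ⟨h1, h2⟩ := h
  have hiA : i < A.length := h1 ▸ hi
  have hrow : (A.getD i []).length = n := by
    rw [List.getD_eq_getElem _ _ hiA]; exact h2 _ (List.getElem_mem hiA)
  unfold pvGet2 pvSet2
  rw [pvGetD_set_self _ _ _ _ hiA, pvGetD_set_self _ _ _ _ (by omega)]

lemma pvGet2_set2_ne {A : List (List Int)} {i j a b : Nat} (v : Int)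
    (h : a ≠ i ∨ b ≠ j) : pvGet2 (pvSet2 A i j v) a b = pvGet2 A a b := by
  unfold pvGet2 pvSet2
  rcases h with h | h
  · rw [pvGetD_set_ne _ _ _ _ _ (fun e => h e.symm)]
  · by_cases ha : a = i
    · subst ha
      by_cases hi : a < A.length
      · rw [pvGetD_set_self _ _ _ _ hi, pvGetD_set_ne _ _ _ _ _ (fun e => h e.symm)]
      · rw [List.set_eq_of_length_le (by omega)]
    · rw [pvGetD_set_ne _ _ _ _ _ (fun e => ha e.symm)]

lemma pvShape_nums0 (g : List (List String)) :
    pvShape (pvNums0 g) g.length (g.headD []).length := by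
  constructor
  · simp [pvNums0]
  · intro r hr
    simp only [pvNums0, List.mem_map] at hr
    obtain ⟨t, -, rfl⟩ := hr
    simp

lemma pvGet2_nums0 (g : List (List String)) (a b : Nat) : pvGet2 (pvNums0 g) a b = 0 := by
  have : pvNums0 g = List.replicate g.length (List.replicate (g.headD []).length (0 : Int)) := by
    simp [pvNums0, List.map_const']
  rw [this]
  unfold pvGet2
  simp only [List.getD_eq_getElem?_getD, List.getElem?_replicate]
  split <;> simp [List.getElem?_replicate]
  split <;> simp

lemma pvShape_headD {A : List (List Int)} {m n : Nat} (h : pvShape A m n) (hm : 0 < m) :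
    (A.headD []).length = n := by
  obtain ⟨h1, h2⟩ := h
  cases A with
  | nil => simp at h1; omega
  | cons r t => exact h2 r (by simp)

-- ---------- phase 1: row passes ----------
lemma pvA_left (g : List (List String)) (i : Nat) (N : List (List Int))
    (hsh : pvShape N g.length (g.headD []).length) (hi : i < g.length) :
    ∀ k, k ≤ (g.headD []).length →
      ((List.range k).foldl (pvStepL g i) ((0 : Int), N)).1
        = pvSeg (((pvRowL g i).take k).reverse)
      ∧ pvShape ((List.range k).foldl (pvStepL g i) ((0 : Int), N)).2 g.length (g.headD []).length
      ∧ ∀ a b, pvGet2 ((List.range k).foldl (pvStepL g i) ((0 : Int), N)).2 a b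
          = if a = i ∧ b < k ∧ pvPlc g i b then pvSeg (((pvRowL g i).take b).reverse)
            else pvGet2 N a b := by
  intro k
  induction k with
  | zero =>
    intro _
    exact ⟨by simp [pvSeg], by simpa using hsh, by intro a b; simp⟩
  | succ k IH =>
    intro hk
    obtain ⟨IH1, IH2, IH3⟩ := IH (by omega)
    rw [List.range_succ, List.foldl_append, List.foldl_cons, List.foldl_nil]
    set res := (List.range k).foldl (pvStepL g i) ((0 : Int), N) with hres
    have hkR : k < (pvRowL g i).length := by rw [pvRowL_length]; omega
    have htake : ((pvRowL g i).take (k + 1)).reverse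
        = pvCell g i k :: ((pvRowL g i).take k).reverse := by
      rw [pvTake_succ_getD _ "" hkR, List.reverse_append, pvRowL_getD g i (by omega)]
      simp
    by_cases hE : (g.getD i []).getD k "" = "E"
    · have hE' : pvCell g i k = "E" := hE
      have hstep : pvStepL g i res k = (res.1 + 1, res.2) := by
        simp only [pvStepL]
        rw [if_pos hE]
      rw [hstep]
      refine ⟨?_, IH2, ?_⟩
      · rw [htake, pvSeg_cons, hE', IH1]
        simp
        omega
      · intro a b
        rw [IH3 a b]
        rcases Nat.lt_or_ge b k with hb | hb
        · simp only [hb, (by omega : b < k + 1), true_and]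
        · rcases Nat.lt_or_ge b (k + 1) with hb2 | hb2
          · have hbk : b = k := by omega
            subst hbk
            simp [pvPlc, hE']
          · exact if_congr (by constructor <;> (rintro ⟨h1,h2,h3⟩; omega)) rfl rfl
    · by_cases hW : (g.getD i []).getD k "" = "W"
      · have hW' : pvCell g i k = "W" := hW
        have hstep : pvStepL g i res k = ((0 : Int), res.2) := by
          simp only [pvStepL]
          rw [if_neg hE, if_pos hW]
        rw [hstep]
        refine ⟨?_, IH2, ?_⟩
        · rw [htake, pvSeg_cons, hW']
          simp
        · intro a b
          rw [IH3 a b]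
          rcases Nat.lt_or_ge b k with hb | hb
          · simp only [hb, (by omega : b < k + 1), true_and]
          · rcases Nat.lt_or_ge b (k + 1) with hb2 | hb2
            · have hbk : b = k := by omega
              subst hbk
              simp [pvPlc, hW']
            · exact if_congr (by constructor <;> (rintro ⟨h1,h2,h3⟩; omega)) rfl rfl
      · have hE' : ¬ pvCell g i k = "E" := hE
        have hW' : ¬ pvCell g i k = "W" := hW
        have hstep : pvStepL g i res k = (res.1, pvSet2 res.2 i k res.1) := by
          simp only [pvStepL]
          rw [if_neg hE, if_neg hW]
        rw [hstep]
        have hplc : pvPlc g i k = true := by simp [pvPlc, hE', hW']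
        refine ⟨?_, pvShape_set2 IH2 hi k res.1, ?_⟩
        · rw [htake, pvSeg_cons, if_neg hW', if_neg hE', IH1]
          simp
        · intro a b
          by_cases hab : a = i ∧ b = k
          · obtain ⟨ha, hb⟩ := hab
            subst ha; subst hb
            rw [pvGet2_set2_self IH2 hi (by omega) _, IH1]
            simp [hplc, (by omega : b < b + 1)]
          · have hne : a ≠ i ∨ b ≠ k := by tauto
            rw [pvGet2_set2_ne _ hne, IH3 a b]
            rcases Nat.lt_or_ge b k with hb | hb
            · simp only [hb, (by omega : b < k + 1), true_and]
            · rcases Nat.lt_or_ge b (k + 1) with hb2 | hb2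
              · have hbk : b = k := by omega
                subst hbk
                have ha : ¬ a = i := by tauto
                simp [ha]
              · exact if_congr (by constructor <;> (rintro ⟨h1,h2,h3⟩; omega)) rfl rfl

lemma pvA_right (g : List (List String)) (i : Nat) (hi : i < g.length) :
    ∀ k, k ≤ (g.headD []).length → ∀ N : List (List Int),
      pvShape N g.length (g.headD []).length →
      pvShape (((List.range k).reverse).foldl (pvStepR g i)
          (pvSeg ((pvRowL g i).drop k), N)).2 g.length (g.headD []).length
      ∧ ∀ a b, pvGet2 (((List.range k).reverse).foldl (pvStepR g i)
            (pvSeg ((pvRowL g i).drop k), N)).2 a b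
          = if a = i ∧ b < k ∧ pvPlc g i b then pvGet2 N a b + pvSeg ((pvRowL g i).drop (b + 1))
            else pvGet2 N a b := by
  intro k
  induction k with
  | zero =>
    intro _ N hsh
    exact ⟨by simpa using hsh, by intro a b; simp⟩
  | succ k IH =>
    intro hk N hsh
    have hrev : (List.range (k + 1)).reverse = k :: (List.range k).reverse := by
      rw [List.range_succ]; simp
    rw [hrev, List.foldl_cons]
    have hkR : k < (pvRowL g i).length := by rw [pvRowL_length]; omega
    have hdrop : (pvRowL g i).drop k = pvCell g i k :: (pvRowL g i).drop (k + 1) := by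
      rw [pvDrop_getD_cons _ "" hkR, pvRowL_getD g i (by omega)]
    by_cases hW : (g.getD i []).getD k "" = "W"
    · have hW' : pvCell g i k = "W" := hW
      have hstep : pvStepR g i (pvSeg ((pvRowL g i).drop (k + 1)), N) k
          = (pvSeg ((pvRowL g i).drop k), N) := by
        simp only [pvStepR]
        rw [if_pos hW, hdrop, pvSeg_cons, if_pos hW']
      rw [hstep]
      obtain ⟨J1, J2⟩ := IH (by omega) N hsh
      refine ⟨J1, ?_⟩
      intro a b
      rw [J2 a b]
      rcases Nat.lt_or_ge b k with hb | hb
      · simp only [hb, (by omega : b < k + 1), true_and]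
      · rcases Nat.lt_or_ge b (k + 1) with hb2 | hb2
        · have hbk : b = k := by omega
          subst hbk
          simp [pvPlc, hW']
        · exact if_congr (by constructor <;> (rintro ⟨h1, h2, h3⟩; omega)) rfl rfl
    · by_cases hE : (g.getD i []).getD k "" = "E"
      · have hE' : pvCell g i k = "E" := hE
        have hstep : pvStepR g i (pvSeg ((pvRowL g i).drop (k + 1)), N) k
            = (pvSeg ((pvRowL g i).drop k), N) := by
          simp only [pvStepR]
          rw [if_neg hW, if_pos hE, hdrop, pvSeg_cons, hE']
          simp
          omega
        rw [hstep]
        obtain ⟨J1, J2⟩ := IH (by omega) N hsh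
        refine ⟨J1, ?_⟩
        intro a b
        rw [J2 a b]
        rcases Nat.lt_or_ge b k with hb | hb
        · simp only [hb, (by omega : b < k + 1), true_and]
        · rcases Nat.lt_or_ge b (k + 1) with hb2 | hb2
          · have hbk : b = k := by omega
            subst hbk
            simp [pvPlc, hE']
          · exact if_congr (by constructor <;> (rintro ⟨h1, h2, h3⟩; omega)) rfl rfl
      · have hE' : ¬ pvCell g i k = "E" := hE
        have hW' : ¬ pvCell g i k = "W" := hW
        have hplc : pvPlc g i k = true := by simp [pvPlc, hE', hW']
        have hacc : pvSeg ((pvRowL g i).drop k) = pvSeg ((pvRowL g i).drop (k + 1)) := by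
          rw [hdrop, pvSeg_cons, if_neg hW', if_neg hE']
          simp
        have hstep : pvStepR g i (pvSeg ((pvRowL g i).drop (k + 1)), N) k
            = (pvSeg ((pvRowL g i).drop k),
               pvSet2 N i k (pvGet2 N i k + pvSeg ((pvRowL g i).drop (k + 1)))) := by
          simp only [pvStepR]
          rw [if_neg hW, if_neg hE, hacc]
        rw [hstep]
        set N' := pvSet2 N i k (pvGet2 N i k + pvSeg ((pvRowL g i).drop (k + 1))) with hN'
        have hsh' : pvShape N' g.length (g.headD []).length :=
          pvShape_set2 hsh hi k _
        obtain ⟨J1, J2⟩ := IH (by omega) N' hsh'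
        refine ⟨J1, ?_⟩
        intro a b
        rw [J2 a b]
        by_cases hab : a = i ∧ b = k
        · obtain ⟨ha, hb⟩ := hab
          subst ha; subst hb
          rw [if_neg (by rintro ⟨h1, h2, h3⟩; omega), hN',
            pvGet2_set2_self hsh hi (by omega) _,
            if_pos ⟨rfl, by omega, hplc⟩]
        · have hne : a ≠ i ∨ b ≠ k := by tauto
          rw [hN', pvGet2_set2_ne _ hne]
          rcases Nat.lt_or_ge b k with hb | hb
          · simp only [hb, (by omega : b < k + 1), true_and]
          · rcases Nat.lt_or_ge b (k + 1) with hb2 | hb2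
            · have hbk : b = k := by omega
              subst hbk
              have ha : ¬ a = i := by tauto
              simp [ha]
            · exact if_congr (by constructor <;> (rintro ⟨h1, h2, h3⟩; omega)) rfl rfl

lemma pvA_rows (g : List (List String)) :
    ∀ k, k ≤ g.length →
      pvShape ((List.range k).foldl (pvRowBody g) (pvNums0 g)) g.length (g.headD []).length
      ∧ ∀ a b, pvGet2 ((List.range k).foldl (pvRowBody g) (pvNums0 g)) a b
          = if a < k ∧ b < (g.headD []).length ∧ pvPlc g a b then pvLR g a b else 0 := by
  intro k
  induction k with
  | zero =>
    refine fun _ => ⟨pvShape_nums0 g, ?_⟩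
    intro a b
    simp [pvGet2_nums0]
  | succ k IH =>
    intro hk
    obtain ⟨S, V⟩ := IH (by omega)
    rw [List.range_succ, List.foldl_append, List.foldl_cons, List.foldl_nil]
    set M := (List.range k).foldl (pvRowBody g) (pvNums0 g) with hM
    have hkm : k < g.length := by omega
    have hbody : pvRowBody g M k
        = (((List.range (g.headD []).length).reverse).foldl (pvStepR g k)
            (pvSeg ((pvRowL g k).drop ((g.headD []).length)),
             ((List.range (g.headD []).length).foldl (pvStepL g k) ((0 : Int), M)).2)).2 := by
      simp only [pvRowBody]
      rw [show pvSeg ((pvRowL g k).drop ((g.headD []).length)) = (0 : Int) from by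
        rw [← pvRowL_length g k, List.drop_length]
        rfl]
    rw [hbody]
    obtain ⟨L1, L2, L3⟩ := pvA_left g k M S hkm (g.headD []).length (le_refl _)
    obtain ⟨R1, R2⟩ := pvA_right g k hkm (g.headD []).length (le_refl _) _ L2
    refine ⟨R1, ?_⟩
    intro a b
    rw [R2 a b, L3 a b, V a b]
    by_cases hak : a = k
    · subst hak
      by_cases hb : b < (g.headD []).length ∧ pvPlc g a b
      · obtain ⟨hb1, hb2⟩ := hb
        rw [if_pos (⟨rfl, hb1, hb2⟩ : a = a ∧ b < (g.headD []).length ∧ pvPlc g a b = true),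
          if_pos (⟨rfl, hb1, hb2⟩ : a = a ∧ b < (g.headD []).length ∧ pvPlc g a b = true),
          if_pos (⟨by omega, hb1, hb2⟩ : a < a + 1 ∧ b < (g.headD []).length ∧ pvPlc g a b = true)]
        rfl
      · have hnb : ¬ (a = a ∧ b < (g.headD []).length ∧ pvPlc g a b = true) := by tauto
        rw [if_neg hnb, if_neg hnb, if_neg (by rintro ⟨h1, h2, h3⟩; omega),
          if_neg (by rintro ⟨h1, h2, h3⟩; exact hnb ⟨rfl, h2, h3⟩)]
    · rw [if_neg (by tauto), if_neg (by tauto)]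
      exact if_congr (by constructor <;> (rintro ⟨h1, h2, h3⟩; exact ⟨by omega, h2, h3⟩)) rfl rfl

-- ---------- phase 2: column passes ----------
lemma pvA_down (g : List (List String)) (j : Nat) (hj : j < (g.headD []).length)
    (N : List (List Int)) (hsh : pvShape N g.length (g.headD []).length) :
    ∀ k, k ≤ g.length →
      ((List.range k).foldl (pvStepD g j) ((0 : Int), N)).1
        = pvSeg (((pvColL g j).take k).reverse)
      ∧ pvShape ((List.range k).foldl (pvStepD g j) ((0 : Int), N)).2 g.length (g.headD []).length
      ∧ ∀ a b, pvGet2 ((List.range k).foldl (pvStepD g j) ((0 : Int), N)).2 a b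
          = if b = j ∧ a < k ∧ pvPlc g a j then pvGet2 N a b + pvSeg (((pvColL g j).take a).reverse)
            else pvGet2 N a b := by
  intro k
  induction k with
  | zero =>
    intro _
    exact ⟨by simp [pvSeg], by simpa using hsh, by intro a b; simp⟩
  | succ k IH =>
    intro hk
    obtain ⟨IH1, IH2, IH3⟩ := IH (by omega)
    rw [List.range_succ, List.foldl_append, List.foldl_cons, List.foldl_nil]
    set res := (List.range k).foldl (pvStepD g j) ((0 : Int), N) with hres
    have hkC : k < (pvColL g j).length := by rw [pvColL_length]; omega
    have htake : ((pvColL g j).take (k + 1)).reverse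
        = pvCell g k j :: ((pvColL g j).take k).reverse := by
      rw [pvTake_succ_getD _ "" hkC, List.reverse_append, pvColL_getD g j (by omega)]
      simp
    by_cases hE : (g.getD k []).getD j "" = "E"
    · have hE' : pvCell g k j = "E" := hE
      have hstep : pvStepD g j res k = (res.1 + 1, res.2) := by
        simp only [pvStepD]
        rw [if_pos hE]
      rw [hstep]
      refine ⟨?_, IH2, ?_⟩
      · rw [htake, pvSeg_cons, hE', IH1]
        simp
        omega
      · intro a b
        rw [IH3 a b]
        by_cases hbj : b = j
        · subst hbj
          by_cases hak : a = k
          · subst hak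
            simp [pvPlc, hE']
          · exact if_congr (by constructor <;> (rintro ⟨h1, h2, h3⟩; exact ⟨h1, by omega, h3⟩)) rfl rfl
        · rw [if_neg (by tauto), if_neg (by tauto)]
    · by_cases hW : (g.getD k []).getD j "" = "W"
      · have hW' : pvCell g k j = "W" := hW
        have hstep : pvStepD g j res k = ((0 : Int), res.2) := by
          simp only [pvStepD]
          rw [if_neg hE, if_pos hW]
        rw [hstep]
        refine ⟨?_, IH2, ?_⟩
        · rw [htake, pvSeg_cons, hW']
          simp
        · intro a b
          rw [IH3 a b]
          by_cases hbj : b = j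
          · subst hbj
            by_cases hak : a = k
            · subst hak
              simp [pvPlc, hW']
            · exact if_congr (by constructor <;> (rintro ⟨h1, h2, h3⟩; exact ⟨h1, by omega, h3⟩)) rfl rfl
          · rw [if_neg (by tauto), if_neg (by tauto)]
      · have hE' : ¬ pvCell g k j = "E" := hE
        have hW' : ¬ pvCell g k j = "W" := hW
        have hplc : pvPlc g k j = true := by simp [pvPlc, hE', hW']
        have hstep : pvStepD g j res k
            = (res.1, pvSet2 res.2 k j (pvGet2 res.2 k j + res.1)) := by
          simp only [pvStepD]
          rw [if_neg hE, if_neg hW]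
        rw [hstep]
        refine ⟨?_, pvShape_set2 IH2 (by omega) j _, ?_⟩
        · rw [htake, pvSeg_cons, if_neg hW', if_neg hE', IH1]
          simp
        · intro a b
          by_cases hab : a = k ∧ b = j
          · obtain ⟨ha, hb⟩ := hab
            subst ha; subst hb
            rw [pvGet2_set2_self IH2 (by omega) hj _, IH3 a b, IH1,
              if_neg (by rintro ⟨h1, h2, h3⟩; omega),
              if_pos (⟨rfl, by omega, hplc⟩ : b = b ∧ a < a + 1 ∧ pvPlc g a b = true)]
          · have hne : a ≠ k ∨ b ≠ j := by tauto
            rw [pvGet2_set2_ne _ hne, IH3 a b]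
            by_cases hbj : b = j
            · subst hbj
              have hak : a ≠ k := by tauto
              exact if_congr (by constructor <;> (rintro ⟨h1, h2, h3⟩; exact ⟨h1, by omega, h3⟩)) rfl rfl
            · rw [if_neg (by tauto), if_neg (by tauto)]

lemma pvA_up (g : List (List String)) (j : Nat) (hj : j < (g.headD []).length) :
    ∀ k, k ≤ g.length → ∀ (N : List (List Int)) (mh0 : Int),
      pvShape N g.length (g.headD []).length →
      pvShape (((List.range k).reverse).foldl (pvStepU g j)
          (pvSeg ((pvColL g j).drop k), mh0, N)).2.2 g.length (g.headD []).length
      ∧ (((List.range k).reverse).foldl (pvStepU g j)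
          (pvSeg ((pvColL g j).drop k), mh0, N)).2.1
        = ((List.range k).reverse).foldl (fun mh t =>
            if pvPlc g t j then max mh (pvGet2 N t j + pvSeg ((pvColL g j).drop (t + 1))) else mh) mh0
      ∧ ∀ a b, pvGet2 (((List.range k).reverse).foldl (pvStepU g j)
            (pvSeg ((pvColL g j).drop k), mh0, N)).2.2 a b
          = if b = j ∧ a < k ∧ pvPlc g a j then pvGet2 N a b + pvSeg ((pvColL g j).drop (a + 1))
            else pvGet2 N a b := by
  intro k
  induction k with
  | zero =>
    intro _ N mh0 hsh
    exact ⟨by simpa using hsh, rfl, by intro a b; simp⟩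
  | succ k IH =>
    intro hk N mh0 hsh
    have hrev : (List.range (k + 1)).reverse = k :: (List.range k).reverse := by
      rw [List.range_succ]; simp
    rw [hrev, List.foldl_cons, List.foldl_cons]
    have hkC : k < (pvColL g j).length := by rw [pvColL_length]; omega
    have hdrop : (pvColL g j).drop k = pvCell g k j :: (pvColL g j).drop (k + 1) := by
      rw [pvDrop_getD_cons _ "" hkC, pvColL_getD g j (by omega)]
    by_cases hE : (g.getD k []).getD j "" = "E"
    · have hE' : pvCell g k j = "E" := hE
      have hnp : ¬ pvPlc g k j = true := by simp [pvPlc, hE']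
      have hstep : pvStepU g j (pvSeg ((pvColL g j).drop (k + 1)), mh0, N) k
          = (pvSeg ((pvColL g j).drop k), mh0, N) := by
        simp only [pvStepU]
        rw [if_pos hE, hdrop, pvSeg_cons, hE']
        simp
        omega
      rw [hstep]
      obtain ⟨I1, I2, I3⟩ := IH (by omega) N mh0 hsh
      have hbeta : (if pvPlc g k j = true then
            max mh0 (pvGet2 N k j + pvSeg ((pvColL g j).drop (k + 1))) else mh0) = mh0 := by
        simp [hnp]
      rw [hbeta]
      refine ⟨I1, I2, ?_⟩
      intro a b
      rw [I3 a b]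
      by_cases hbj : b = j
      · subst hbj
        by_cases hak : a = k
        · subst hak
          simp [pvPlc, hE']
        · exact if_congr (by constructor <;> (rintro ⟨h1, h2, h3⟩; exact ⟨h1, by omega, h3⟩)) rfl rfl
      · rw [if_neg (by tauto), if_neg (by tauto)]
    · by_cases hW : (g.getD k []).getD j "" = "W"
      · have hW' : pvCell g k j = "W" := hW
        have hnp : ¬ pvPlc g k j = true := by simp [pvPlc, hW']
        have hstep : pvStepU g j (pvSeg ((pvColL g j).drop (k + 1)), mh0, N) k
            = (pvSeg ((pvColL g j).drop k), mh0, N) := by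
          simp only [pvStepU]
          rw [if_neg hE, if_pos hW, hdrop, pvSeg_cons, if_pos hW']
        rw [hstep]
        obtain ⟨I1, I2, I3⟩ := IH (by omega) N mh0 hsh
        have hbeta : (if pvPlc g k j = true then
              max mh0 (pvGet2 N k j + pvSeg ((pvColL g j).drop (k + 1))) else mh0) = mh0 := by
          simp [hnp]
        rw [hbeta]
        refine ⟨I1, I2, ?_⟩
        intro a b
        rw [I3 a b]
        by_cases hbj : b = j
        · subst hbj
          by_cases hak : a = k
          · subst hak
            simp [pvPlc, hW']
          · exact if_congr (by constructor <;> (rintro ⟨h1, h2, h3⟩; exact ⟨h1, by omega, h3⟩)) rfl rfl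
        · rw [if_neg (by tauto), if_neg (by tauto)]
      · have hE' : ¬ pvCell g k j = "E" := hE
        have hW' : ¬ pvCell g k j = "W" := hW
        have hplc : pvPlc g k j = true := by simp [pvPlc, hE', hW']
        have hacc : pvSeg ((pvColL g j).drop k) = pvSeg ((pvColL g j).drop (k + 1)) := by
          rw [hdrop, pvSeg_cons, if_neg hW', if_neg hE']
          simp
        have hstep : pvStepU g j (pvSeg ((pvColL g j).drop (k + 1)), mh0, N) k
            = (pvSeg ((pvColL g j).drop k),
               max mh0 (pvGet2 N k j + pvSeg ((pvColL g j).drop (k + 1))),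
               pvSet2 N k j (pvGet2 N k j + pvSeg ((pvColL g j).drop (k + 1)))) := by
          simp only [pvStepU]
          rw [if_neg hE, if_neg hW, hacc]
        rw [hstep]
        set v := pvGet2 N k j + pvSeg ((pvColL g j).drop (k + 1)) with hv
        set N' := pvSet2 N k j v with hN'
        have hsh' : pvShape N' g.length (g.headD []).length :=
          pvShape_set2 hsh (by omega) j _
        obtain ⟨I1, I2, I3⟩ := IH (by omega) N' (max mh0 v) hsh'
        have hbeta : (if pvPlc g k j = true then
              max mh0 (pvGet2 N k j + pvSeg ((pvColL g j).drop (k + 1))) else mh0)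
            = max mh0 v := by
          simp [hplc, hv]
        rw [hbeta]
        refine ⟨I1, ?_, ?_⟩
        · rw [I2]
          refine PySem.List.foldl_congr_mem _ _ _ _ ?_
          intro acc t ht
          have htk : t ≠ k := by
            have : t ∈ List.range k := by simpa using ht
            have : t < k := by simpa using this
            omega
          rw [hN', pvGet2_set2_ne _ (Or.inl htk)]
        · intro a b
          by_cases hab : a = k ∧ b = j
          · obtain ⟨ha, hb⟩ := hab
            subst ha; subst hb
            rw [I3 a b, if_neg (by rintro ⟨h1, h2, h3⟩; omega), hN',
              pvGet2_set2_self hsh (by omega) hj _,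
              if_pos (⟨rfl, by omega, hplc⟩ : b = b ∧ a < a + 1 ∧ pvPlc g a b = true)]
          · have hne : a ≠ k ∨ b ≠ j := by tauto
            rw [I3 a b]
            by_cases hbj : b = j
            · subst hbj
              have hak : a ≠ k := by tauto
              rw [show pvGet2 N' a b = pvGet2 N a b from by
                rw [hN', pvGet2_set2_ne _ (Or.inl hak)]]
              exact if_congr (by constructor <;> (rintro ⟨h1, h2, h3⟩; exact ⟨h1, by omega, h3⟩)) rfl rfl
            · rw [show pvGet2 N' a b = pvGet2 N a b from by
                rw [hN', pvGet2_set2_ne _ (Or.inr hbj)]]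
              rw [if_neg (by tauto), if_neg (by tauto)]

lemma pvA_cols (g : List (List String)) (N : List (List Int))
    (hsh : pvShape N g.length (g.headD []).length) :
    ∀ k, k ≤ (g.headD []).length → ∀ mh0 : Int,
      pvShape ((List.range k).foldl (pvColBody g) (mh0, N)).2 g.length (g.headD []).length
      ∧ (∀ a b, k ≤ b → pvGet2 ((List.range k).foldl (pvColBody g) (mh0, N)).2 a b = pvGet2 N a b)
      ∧ ((List.range k).foldl (pvColBody g) (mh0, N)).1
        = (List.range k).foldl (fun mh j =>
            ((List.range g.length).reverse).foldl (fun mh t =>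
              if pvPlc g t j then
                max mh (pvGet2 N t j + pvSeg (((pvColL g j).take t).reverse)
                  + pvSeg ((pvColL g j).drop (t + 1)))
              else mh) mh) mh0 := by
  intro k
  induction k with
  | zero =>
    intro _ mh0
    exact ⟨by simpa using hsh, fun a b _ => rfl, rfl⟩
  | succ k IH =>
    intro hk mh0
    obtain ⟨S, U, M⟩ := IH (by omega) mh0
    rw [List.range_succ, List.foldl_append, List.foldl_cons, List.foldl_nil]
    set R := (List.range k).foldl (pvColBody g) (mh0, N) with hR
    have hkn : k < (g.headD []).length := by omega
    have hlen : R.2.length = g.length := S.1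
    obtain ⟨D1, D2, D3⟩ := pvA_down g k hkn R.2 S g.length (le_refl _)
    set s1 := (List.range g.length).foldl (pvStepD g k) ((0 : Int), R.2) with hs1
    have hdm : pvSeg ((pvColL g k).drop g.length) = 0 := by
      rw [← pvColL_length g k, List.drop_length]
      rfl
    obtain ⟨U1, U2, U3⟩ := pvA_up g k hkn g.length (le_refl _) s1.2 R.1 D2
    rw [hdm] at U1 U2 U3
    have hbody : pvColBody g R k
        = ((((List.range g.length).reverse).foldl (pvStepU g k) ((0 : Int), R.1, s1.2)).2.1,
           (((List.range g.length).reverse).foldl (pvStepU g k) ((0 : Int), R.1, s1.2)).2.2) := by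
      simp only [pvColBody]
      rw [hlen, ← hs1, D2.1]
    rw [hbody]
    refine ⟨U1, ?_, ?_⟩
    · intro a b hb
      rw [U3 a b, if_neg (by rintro ⟨h1, h2, h3⟩; omega),
        D3 a b, if_neg (by rintro ⟨h1, h2, h3⟩; omega)]
      exact U a b (by omega)
    · rw [List.foldl_append, List.foldl_cons, List.foldl_nil, U2, M]
      refine PySem.List.foldl_congr_mem _ _ _ _ ?_
      intro acc t ht
      have htm : t < g.length := by
        have : t ∈ List.range g.length := by simpa using ht
        simpa using this
      by_cases hp : pvPlc g t k = true
      · rw [if_pos hp, if_pos hp,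
          D3 t k, if_pos (⟨rfl, htm, hp⟩ : k = k ∧ t < g.length ∧ pvPlc g t k = true),
          U t k (le_refl k)]
      · rw [if_neg hp, if_neg hp]

-- ---------- A as a nested max-fold ----------
lemma pvA_def (g : List (List String)) (hg : g ≠ []) :
    maxKilledEnemies g =
      ((List.range (((((List.range g.length).foldl (pvRowBody g) (pvNums0 g))).headD []).length)).foldl
        (pvColBody g) ((0 : Int), (List.range g.length).foldl (pvRowBody g) (pvNums0 g))).1 := by
  simp only [maxKilledEnemies]
  rw [if_neg hg]
  rfl

lemma pvA_nested (g : List (List String)) :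
    maxKilledEnemies g
      = (List.range (g.headD []).length).foldl (fun mh j =>
          ((List.range g.length).reverse).foldl (fun mh t =>
            if pvPlc g t j then max mh (pvK g t j) else mh) mh) 0 := by
  by_cases hg : g = []
  · subst hg
    simp [maxKilledEnemies]
  · rw [pvA_def g hg]
    have hm : 0 < g.length := List.length_pos_iff.mpr hg
    obtain ⟨S, V⟩ := pvA_rows g g.length (le_refl _)
    set NR := (List.range g.length).foldl (pvRowBody g) (pvNums0 g) with hNR
    have hhead : (NR.headD []).length = (g.headD []).length := pvShape_headD S hm
    rw [hhead]
    obtain ⟨_, _, C3⟩ := pvA_cols g NR S (g.headD []).length (le_refl _) 0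
    rw [C3]
    refine PySem.List.foldl_congr_mem _ _ _ _ ?_
    intro mh j hjmem
    have hj : j < (g.headD []).length := by simpa using hjmem
    refine PySem.List.foldl_congr_mem _ _ _ _ ?_
    intro acc t htmem
    have ht : t < g.length := by
      have : t ∈ List.range g.length := by simpa using htmem
      simpa using this
    by_cases hp : pvPlc g t j = true
    · rw [if_pos hp, if_pos hp, V t j,
        if_pos (⟨ht, hj, hp⟩ : t < g.length ∧ j < (g.headD []).length ∧ pvPlc g t j = true)]
      rfl
    · rw [if_neg hp, if_neg hp]

-- ---------- B as a nested max-fold ----------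
lemma pvB_nested (g : List (List String)) :
    maxKilledEnemies_alt g
      = (List.range g.length).foldl (fun best i =>
          (List.range (g.headD []).length).foldl (fun best j =>
            if pvPlc g i j then max best (pvK g i j) else best) best) 0 := by
  simp only [maxKilledEnemies_alt]
  refine PySem.List.foldl_congr_mem _ _ _ _ ?_
  intro best i _
  refine PySem.List.foldl_congr_mem _ _ _ _ ?_
  intro acc j _
  by_cases hc : (g.getD i []).getD j "" = "E" ∨ (g.getD i []).getD j "" = "W"
  · rw [if_pos hc, if_neg (show ¬ pvPlc g i j = true from by
      rcases hc with h | h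
      · simp [pvPlc, show pvCell g i j = "E" from h]
      · simp [pvPlc, show pvCell g i j = "W" from h])]
  · have hc' : ¬ (pvCell g i j = "E" ∨ pvCell g i j = "W") := hc
    obtain ⟨h1, h2⟩ := not_or.mp hc'
    rw [if_neg hc, if_pos (show pvPlc g i j = true from by simp [pvPlc, h1, h2])]
    rfl

-- ---------- fold/permutation machinery ----------
lemma pvFoldl_flatMap {a b : Type} (f : b → a → b) (g : Nat → List a) (l : List Nat) (init : b) :
    (l.flatMap g).foldl f init = l.foldl (fun acc x => (g x).foldl f acc) init := by
  induction l generalizing init with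
  | nil => rfl
  | cons x t ih => simp [List.flatMap_cons, List.foldl_append, ih]

lemma pvFoldl_perm {a b : Type} {f : b → a → b}
    (hf : ∀ acc x y, f (f acc x) y = f (f acc y) x) {l₁ l₂ : List a} (p : l₁.Perm l₂) :
    ∀ init, l₁.foldl f init = l₂.foldl f init := by
  induction p with
  | nil => intro init; rfl
  | cons x p ih => intro init; simp only [List.foldl_cons]; exact ih _
  | swap x y l => intro init; simp only [List.foldl_cons]; rw [hf]
  | trans p1 p2 ih1 ih2 => intro init; rw [ih1, ih2]

lemma pvFlatMap_perm {a b : Type} {l : List a} {f g : a → List b}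
    (h : ∀ x ∈ l, (f x).Perm (g x)) : (l.flatMap f).Perm (l.flatMap g) := by
  induction l with
  | nil => rfl
  | cons x t ih =>
    simp only [List.flatMap_cons]
    exact (h x (by simp)).append (ih fun y hy => h y (by simp [hy]))

lemma pvFlatMap_snoc_perm {a b : Type} (l : List a) (f : a → List b) (g : a → b) :
    (l.flatMap fun x => f x ++ [g x]).Perm (l.flatMap f ++ l.map g) := by
  induction l with
  | nil => simp
  | cons x t ih =>
    simp only [List.flatMap_cons, List.map_cons, List.append_assoc]
    refine List.Perm.append_left (f x) ?_
    refine List.Perm.trans (List.Perm.append_left [g x] ih) ?_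
    show (g x :: (List.flatMap f t ++ List.map g t)).Perm (List.flatMap f t ++ g x :: List.map g t)
    exact List.perm_middle.symm

lemma pvPairs_swap_perm (n m : Nat) :
    ((List.range n).flatMap fun j => (List.range m).map fun t => (t, j)).Perm
      ((List.range m).flatMap fun t => (List.range n).map fun j => (t, j)) := by
  induction n with
  | zero => simp
  | succ n ih =>
    have hR : ((List.range m).flatMap fun t => (List.range (n + 1)).map fun j => (t, j))
        = (List.range m).flatMap fun t => ((List.range n).map fun j => (t, j)) ++ [(t, n)] := by
      simp [List.range_succ]
    rw [hR, List.range_succ, List.flatMap_append]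
    refine List.Perm.trans ?_ (pvFlatMap_snoc_perm (List.range m) _ _).symm
    simp only [List.flatMap_cons, List.flatMap_nil, List.append_nil]
    exact ih.append (List.Perm.refl _)

lemma pvSwap_folds (g : List (List String)) :
    (List.range (g.headD []).length).foldl (fun mh j =>
        ((List.range g.length).reverse).foldl (fun mh t =>
          if pvPlc g t j then max mh (pvK g t j) else mh) mh) 0
      = (List.range g.length).foldl (fun best i =>
          (List.range (g.headD []).length).foldl (fun best j =>
            if pvPlc g i j then max best (pvK g i j) else best) best) 0 := by
  have hrc : ∀ (acc : Int) (p q : Nat × Nat),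
      (fun b (p : Nat × Nat) => if pvPlc g p.1 p.2 then max b (pvK g p.1 p.2) else b)
        ((fun b (p : Nat × Nat) => if pvPlc g p.1 p.2 then max b (pvK g p.1 p.2) else b) acc p) q
      = (fun b (p : Nat × Nat) => if pvPlc g p.1 p.2 then max b (pvK g p.1 p.2) else b)
        ((fun b (p : Nat × Nat) => if pvPlc g p.1 p.2 then max b (pvK g p.1 p.2) else b) acc q) p := by
    intro acc p q
    by_cases h1 : pvPlc g p.1 p.2 = true <;> by_cases h2 : pvPlc g q.1 q.2 = true <;>
      simp [h1, h2, max_right_comm]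
  have h1 : (List.range (g.headD []).length).foldl (fun mh j =>
        ((List.range g.length).reverse).foldl (fun mh t =>
          if pvPlc g t j then max mh (pvK g t j) else mh) mh) 0
      = ((List.range (g.headD []).length).flatMap fun j =>
          ((List.range g.length).reverse).map fun t => (t, j)).foldl
          (fun b (p : Nat × Nat) => if pvPlc g p.1 p.2 then max b (pvK g p.1 p.2) else b) 0 := by
    rw [pvFoldl_flatMap]
    refine (PySem.List.foldl_congr_mem _ _ _ _ ?_)
    intro acc j _
    rw [List.foldl_map]
  have h2 : (List.range g.length).foldl (fun best i =>
        (List.range (g.headD []).length).foldl (fun best j =>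
          if pvPlc g i j then max best (pvK g i j) else best) best) 0
      = ((List.range g.length).flatMap fun i =>
          (List.range (g.headD []).length).map fun j => (i, j)).foldl
          (fun b (p : Nat × Nat) => if pvPlc g p.1 p.2 then max b (pvK g p.1 p.2) else b) 0 := by
    rw [pvFoldl_flatMap]
    refine (PySem.List.foldl_congr_mem _ _ _ _ ?_)
    intro acc i _
    rw [List.foldl_map]
  rw [h1, h2]
  refine pvFoldl_perm hrc ?_ 0
  refine List.Perm.trans (pvFlatMap_perm ?_) (pvPairs_swap_perm _ _)
  intro j _
  exact List.Perm.map _ (List.reverse_perm _)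

-- ===== VERDICT (by name: the statement is the Claim_ definition above) =====
theorem maxKilledEnemies_spec : Claim_equal_maxKilledEnemies := by
  intro grid _ _
  unfold Spec_maxKilledEnemies
  rw [pvA_nested, pvB_nested, pvSwap_folds]
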